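-- pv_equiv track=rewrite | github.com/Green0v0/TIL | Playdata/2_Week/기능개발.py | solution
-- ===== SOURCE A (Python) =====
-- from math import ceil
-- from math import ceil
--
-- def solution(progresses, speeds):
--     progress = []
--     for i in range(len(progresses)):
--         progress.append(ceil((100 - progresses[i]) / speeds[i]))
--
--     stack = []
--     result = []
--     cnt = 1
--     for q in progress:
--         if not stack:
--             stack.append(q)
--             continue
--
--         if stack[-1] >= q:
--             cnt += 1
--
--         else:
--             stack.pop()
--             stack.append(q)
--             result.append(cnt)
--             cnt = 1
--
--     if stack:
--         result.append(cnt)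
--
--     return result
-- ===== SOURCE B (Python) =====
-- from math import ceil
--
--
-- def solution(progresses, speeds):
--     days = [ceil((100 - p) / s) for p, s in zip(progresses, speeds)]
--     bounds = []
--     front = None
--     for i, d in enumerate(days):
--         if front is None or d > front:
--             bounds.append(i)
--             front = d
--     bounds.append(len(days))
--     return [y - x for x, y in zip(bounds, bounds[1:])]
-- ===== Notes on version B (the rewrite author's own statement) =====
-- stated objective: alternative
-- what changed: B computes the same completion-day list but derives group sizes as differences of consecutive group-start boundary indices (collected in one pass, closed with a len sentinel) instead of A's one-element stack with a running counter.
import Mathlib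
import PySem

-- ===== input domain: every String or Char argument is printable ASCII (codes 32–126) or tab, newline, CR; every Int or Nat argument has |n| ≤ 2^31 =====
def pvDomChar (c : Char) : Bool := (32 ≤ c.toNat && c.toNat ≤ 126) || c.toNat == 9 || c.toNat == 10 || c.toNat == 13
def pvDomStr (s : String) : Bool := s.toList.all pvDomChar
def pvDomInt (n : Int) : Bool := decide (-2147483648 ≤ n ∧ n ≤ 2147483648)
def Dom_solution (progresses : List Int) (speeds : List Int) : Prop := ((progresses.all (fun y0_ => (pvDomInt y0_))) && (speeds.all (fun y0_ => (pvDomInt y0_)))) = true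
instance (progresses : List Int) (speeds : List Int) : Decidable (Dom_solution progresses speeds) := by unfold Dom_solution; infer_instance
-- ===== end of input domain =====

-- B computes the group sizes as differences of group-start indices instead of A's running counter; objective: alternative decomposition.

-- ===== PORT A =====
-- ceil((100 - p) / s) exactly: on Dom all magnitudes are ≤ 2^31 + 100 < 2^53, so Python's
-- float division is rounded closely enough that math.ceil of it equals the exact rational
-- ceiling, which is -((-a) // s) with Python floor division.
def pvCeilDiv (a b : Int) : Int := -(PySem.Int.floordiv (-a) b)

-- the body of A's grouping loop (state: stack, result, cnt)
def pvStepA (st : List Int × List Int × Int) (q : Int) : List Int × List Int × Int :=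
  let (stack, result, cnt) := st
  if stack.isEmpty then (stack ++ [q], result, cnt)
  else if q ≤ PySem.List.pyGetD stack (-1) 0 then (stack, result, cnt + 1)
  else (stack.dropLast ++ [q], result ++ [cnt], 1)

def solution (progresses : List Int) (speeds : List Int) : List Int :=
  let progress := (PySem.List.pyRange 0 progresses.length 1).foldl
    (fun acc i => acc ++ [pvCeilDiv (100 - PySem.List.pyGetD progresses i 0) (PySem.List.pyGetD speeds i 0)]) []
  let fin := progress.foldl pvStepA ([], [], 1)
  if fin.1.isEmpty then fin.2.1 else fin.2.1 ++ [fin.2.2]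

-- ===== PORT B =====
-- the body of B's boundary loop (state: bounds, front)
def pvStepB (st : List Int × Option Int) (id : Int × Int) : List Int × Option Int :=
  let (bounds, front) := st
  match front with
  | none => (bounds ++ [id.1], some id.2)
  | some f => if id.2 > f then (bounds ++ [id.1], some id.2) else (bounds, front)

def solution_alt (progresses : List Int) (speeds : List Int) : List Int :=
  let days := (progresses.zip speeds).map (fun pq => pvCeilDiv (100 - pq.1) pq.2)
  let bounds := ((PySem.List.enumerate days 0).foldl pvStepB ([], none)).1 ++ [(days.length : Int)]
  List.zipWith (fun x y => y - x) bounds (bounds.drop 1)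

-- ===== PRECONDITION & SPEC =====
-- Pre_ excludes exactly the inputs where A raises: IndexError when speeds is shorter than
-- progresses, ZeroDivisionError when a used speed is 0.
def Pre_solution (progresses : List Int) (speeds : List Int) : Prop :=
  progresses.length ≤ speeds.length ∧ ∀ s ∈ speeds.take progresses.length, s ≠ 0
instance (progresses : List Int) (speeds : List Int) : Decidable (Pre_solution progresses speeds) := by unfold Pre_solution; infer_instance

def pvWitness_solution : List Int × List Int := ([93, 30, 55], [1, 30, 5])

def Spec_solution (progresses : List Int) (speeds : List Int) (out : List Int) : Prop := out = solution_alt progresses speeds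
instance (progresses : List Int) (speeds : List Int) (out : List Int) : Decidable (Spec_solution progresses speeds out) := by unfold Spec_solution; infer_instance

-- ===== CLAIM (what is proved, stated in full; the proofs are below) =====
def Claim_equal_solution : Prop := ∀ (progresses : List Int) (speeds : List Int), Dom_solution progresses speeds → Pre_solution progresses speeds → Spec_solution progresses speeds (solution progresses speeds)

-- ===== LEMMAS AND PROOFS =====

-- reference grouping: front f, current count c
def pvGrp (f c : Int) : List Int → List Int
  | [] => [c]
  | q :: rest => if q ≤ f then pvGrp f (c + 1) rest else c :: pvGrp q 1 rest

-- start indices of the groups after the first, front f, next index i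
def pvStarts (f i : Int) : List Int → List Int
  | [] => []
  | q :: rest => if q > f then i :: pvStarts q (i + 1) rest else pvStarts f (i + 1) rest

-- final front value of B's loop
def pvFront (f : Int) : List Int → Int
  | [] => f
  | q :: rest => if q > f then pvFront q rest else pvFront f rest

def pvDiffs (l : List Int) : List Int := List.zipWith (fun x y => y - x) l (l.drop 1)

lemma pvDiffs_cons_cons (a b : Int) (l : List Int) :
    pvDiffs (a :: b :: l) = (b - a) :: pvDiffs (b :: l) := by
  simp [pvDiffs]

lemma foldA (xs : List Int) : ∀ (f c : Int) (res : List Int),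
    (let fin := xs.foldl pvStepA ([f], res, c);
     if fin.1.isEmpty then fin.2.1 else fin.2.1 ++ [fin.2.2]) = res ++ pvGrp f c xs := by
  induction xs with
  | nil => intro f c res; simp [pvGrp]
  | cons q rest ih =>
    intro f c res
    by_cases h : q ≤ f
    · have : pvStepA ([f], res, c) q = ([f], res, c + 1) := by
        simp [pvStepA, PySem.List.pyGetD, PySem.List.pyGet?, PySem.List.pyIdx?, h]
      simp only [List.foldl_cons, this, ih, pvGrp, if_pos h]
    · have : pvStepA ([f], res, c) q = ([q], res ++ [c], 1) := by
        simp [pvStepA, PySem.List.pyGetD, PySem.List.pyGet?, PySem.List.pyIdx?, h]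
      simp only [List.foldl_cons, this, ih, pvGrp, if_neg h, List.append_assoc,
        List.singleton_append]

lemma foldB (xs : List Int) : ∀ (f i : Int) (bs : List Int),
    (PySem.List.enumerate xs i).foldl pvStepB (bs, some f)
      = (bs ++ pvStarts f i xs, some (pvFront f xs)) := by
  induction xs with
  | nil => intro f i bs; simp [PySem.List.enumerate_nil, pvStarts, pvFront]
  | cons q rest ih =>
    intro f i bs
    rw [PySem.List.enumerate_cons]
    by_cases h : q > f
    · have : pvStepB (bs, some f) (i, q) = (bs ++ [i], some q) := by
        simp [pvStepB, h]
      simp [this, ih, pvStarts, pvFront, h]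
    · have : pvStepB (bs, some f) (i, q) = (bs, some f) := by
        simp [pvStepB, h]
      simp [this, ih, pvStarts, pvFront, h]

lemma diffs_grp (xs : List Int) : ∀ (f c i : Int),
    pvDiffs ((i - c) :: (pvStarts f i xs ++ [i + xs.length])) = pvGrp f c xs := by
  induction xs with
  | nil => intro f c i; simp [pvStarts, pvGrp, pvDiffs]
  | cons q rest ih =>
    intro f c i
    by_cases h : q > f
    · have h1 : ¬ q ≤ f := by omega
      rw [show pvStarts f i (q :: rest) = i :: pvStarts q (i + 1) rest from by
        simp [pvStarts, h]]
      rw [List.cons_append, pvDiffs_cons_cons]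
      have h2 : (i : Int) = (i + 1) - 1 := by ring
      have h3 : (i + ((q :: rest).length : Int)) = (i + 1) + (rest.length : Int) := by
        push_cast [List.length_cons]; ring
      rw [h3]
      calc pvDiffs ((i - c) :: i :: (pvStarts q (i + 1) rest ++ [i + 1 + (rest.length : Int)]))
            = (i - (i - c)) :: pvDiffs (i :: (pvStarts q (i + 1) rest ++ [i + 1 + (rest.length : Int)])) := by
              rw [pvDiffs_cons_cons]
        _ = c :: pvDiffs (((i + 1) - 1) :: (pvStarts q (i + 1) rest ++ [i + 1 + (rest.length : Int)])) := by
              rw [← h2]; congr 1; ring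
        _ = c :: pvGrp q 1 rest := by rw [ih]
        _ = pvGrp f c (q :: rest) := by simp [pvGrp, h1]
    · have h1 : q ≤ f := by omega
      rw [show pvStarts f i (q :: rest) = pvStarts f (i + 1) rest from by
        simp [pvStarts, h]]
      have h2 : i - c = (i + 1) - (c + 1) := by ring
      have h3 : (i + ((q :: rest).length : Int)) = (i + 1) + (rest.length : Int) := by
        push_cast [List.length_cons]; ring
      rw [h2, h3, ih, show pvGrp f c (q :: rest) = pvGrp f (c + 1) rest from by
        simp [pvGrp, h1]]

lemma days_eq (progresses speeds : List Int) (hlen : progresses.length ≤ speeds.length) :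
    (PySem.List.pyRange 0 progresses.length 1).foldl
      (fun acc i => acc ++ [pvCeilDiv (100 - PySem.List.pyGetD progresses i 0)
                                      (PySem.List.pyGetD speeds i 0)]) []
    = (progresses.zip speeds).map (fun pq => pvCeilDiv (100 - pq.1) pq.2) := by
  rw [PySem.List.foldl_append_singleton_eq_map]
  apply List.ext_getElem
  · simp [PySem.List.length_pyRange_one]
    omega
  · intro k h1 h2
    have hk : k < progresses.length := by
      simpa [PySem.List.length_pyRange_one] using h1
    have hk2 : k < speeds.length := by omega
    simp [PySem.List.getElem_pyRange_one, PySem.List.pyGetD_natCast,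
      List.getD_eq_getElem?_getD, hk, hk2]

lemma solution_eq_grp (progresses speeds : List Int)
    (hlen : progresses.length ≤ speeds.length) :
    solution progresses speeds
      = match (progresses.zip speeds).map (fun pq => pvCeilDiv (100 - pq.1) pq.2) with
        | [] => []
        | d :: rest => pvGrp d 1 rest := by
  unfold solution
  rw [days_eq progresses speeds hlen]
  cases hd : (progresses.zip speeds).map (fun pq => pvCeilDiv (100 - pq.1) pq.2) with
  | nil => simp
  | cons d rest =>
    have hstep : pvStepA ([], [], 1) d = ([d], [], 1) := by simp [pvStepA]
    simp only [List.foldl_cons, hstep]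
    simpa using foldA rest d 1 []

lemma solution_alt_eq_grp (progresses speeds : List Int) :
    solution_alt progresses speeds
      = match (progresses.zip speeds).map (fun pq => pvCeilDiv (100 - pq.1) pq.2) with
        | [] => []
        | d :: rest => pvGrp d 1 rest := by
  unfold solution_alt
  cases hd : (progresses.zip speeds).map (fun pq => pvCeilDiv (100 - pq.1) pq.2) with
  | nil => simp [PySem.List.enumerate_nil]
  | cons d rest =>
    show List.zipWith (fun x y => y - x)
        (((PySem.List.enumerate (d :: rest) 0).foldl pvStepB ([], none)).1 ++ [((d :: rest).length : Int)])
        ((((PySem.List.enumerate (d :: rest) 0).foldl pvStepB ([], none)).1 ++ [((d :: rest).length : Int)]).drop 1)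
      = pvGrp d 1 rest
    rw [PySem.List.enumerate_cons]
    have hstep : pvStepB ([], none) (0, d) = ([(0 : Int)], some d) := by
      simp [pvStepB]
    simp only [List.foldl_cons, hstep, foldB]
    have h0 : (0 : Int) = 1 - 1 := by ring
    have h1 : ((d :: rest).length : Int) = 1 + (rest.length : Int) := by push_cast [List.length_cons]; ring
    show pvDiffs ((0 : Int) :: (pvStarts d 1 rest ++ [((d :: rest).length : Int)])) = pvGrp d 1 rest
    rw [h0, h1, diffs_grp]

-- ===== VERDICT (by name: the statement is the Claim_ definition above) =====
theorem solution_spec : Claim_equal_solution := by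
  intro progresses speeds _hdom hpre
  unfold Spec_solution
  rw [solution_eq_grp progresses speeds hpre.1, solution_alt_eq_grp]
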